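-- pv_equiv track=rewrite | github.com/i-need-sleep/VQA_Grounded | utils/ocr_dataset.py | mr_collate
-- ===== SOURCE A (Python) =====
-- def mr_collate(data):
--     texts, coords, outs, img_names = [], [], [], []
--     for line in data:
--         texts.append(line[0])
--         coords.append(line[2])
--         outs += line[1]
--         img_names.append(line[3])
--     return texts, coords, outs, img_names
-- ===== SOURCE B (Python) =====
-- def mr_collate(data):
--     if not data:
--         return [], [], [], []
--     texts, outs, coords, img_names = map(list, zip(*data))
--     outs = [x for row in outs for x in row]
--     return texts, coords, outs, img_names
-- ===== Notes on version B (the rewrite author's own statement) =====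
-- stated objective: idiomatic
-- what changed: B transposes the rows in one shot with zip(*data) into four column tuples (instead of A's fused loop appending to four mutable accumulators) and then flattens only the outs column; empty input is handled by an explicit base case because zip-unpacking needs at least one row.
import Mathlib
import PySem

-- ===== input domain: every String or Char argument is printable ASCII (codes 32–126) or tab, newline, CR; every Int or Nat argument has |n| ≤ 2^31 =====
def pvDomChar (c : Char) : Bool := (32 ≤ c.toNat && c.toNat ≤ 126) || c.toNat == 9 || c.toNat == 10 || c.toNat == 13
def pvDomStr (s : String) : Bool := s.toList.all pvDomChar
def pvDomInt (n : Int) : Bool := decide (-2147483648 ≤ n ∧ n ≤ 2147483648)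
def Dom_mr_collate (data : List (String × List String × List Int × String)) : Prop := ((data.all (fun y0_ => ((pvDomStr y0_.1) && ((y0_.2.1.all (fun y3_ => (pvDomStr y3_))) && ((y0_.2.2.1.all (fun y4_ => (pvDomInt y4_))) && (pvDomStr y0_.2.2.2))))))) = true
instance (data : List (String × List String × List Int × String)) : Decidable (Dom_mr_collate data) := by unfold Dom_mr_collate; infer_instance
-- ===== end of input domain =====

-- B transposes the rows with zip(*data) into four column lists and flattens the outs column,
-- instead of A's single loop appending to four mutable accumulators; idiomatic, same O(n) cost.

-- ===== PORT A =====
-- A: one loop over data appending to four accumulators (outs extended by line[1]).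
def mr_collate (data : List (String × List String × List Int × String)) : List String × List (List Int) × List String × List String :=
  let st := data.foldl
    (fun (acc : List String × List (List Int) × List String × List String) line =>
      (acc.1 ++ [line.1], acc.2.1 ++ [line.2.2.1], acc.2.2.1 ++ line.2.1, acc.2.2.2 ++ [line.2.2.2]))
    ([], [], [], [])
  st

-- ===== PORT B =====
-- B-helper: zip(*data) — transpose the list of 4-tuples into a 4-tuple of column lists.
def pvUnzip4 : List (String × List String × List Int × String) →
    List String × List (List String) × List (List Int) × List String
  | [] => ([], [], [], [])
  | (t, o, c, n) :: rest =>
    let (ts, os, cs, ns) := pvUnzip4 rest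
    (t :: ts, o :: os, c :: cs, n :: ns)

-- B: empty base case, then zip-transpose and flatten the outs column.
def mr_collate_alt (data : List (String × List String × List Int × String)) : List String × List (List Int) × List String × List String :=
  match data with
  | [] => ([], [], [], [])
  | _ =>
    let (texts, outs, coords, img_names) := pvUnzip4 data
    (texts, coords, outs.flatMap (fun row => row), img_names)

-- ===== PRECONDITION & SPEC =====
def Spec_mr_collate (data : List (String × List String × List Int × String)) (out : List String × List (List Int) × List String × List String) : Prop := out = mr_collate_alt data
instance (data : List (String × List String × List Int × String)) (out : List String × List (List Int) × List String × List String) : Decidable (Spec_mr_collate data out) := by unfold Spec_mr_collate; infer_instance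

-- ===== CLAIM =====
def Claim_equal_mr_collate : Prop := ∀ (data : List (String × List String × List Int × String)), Dom_mr_collate data → Spec_mr_collate data (mr_collate data)

-- ===== LEMMAS AND PROOFS =====
theorem mr_collate_fold (data : List (String × List String × List Int × String))
    (acc : List String × List (List Int) × List String × List String) :
    data.foldl
      (fun (acc : List String × List (List Int) × List String × List String) line =>
        (acc.1 ++ [line.1], acc.2.1 ++ [line.2.2.1], acc.2.2.1 ++ line.2.1, acc.2.2.2 ++ [line.2.2.2]))
      acc
    = (acc.1 ++ data.map (fun line => line.1),
       acc.2.1 ++ data.map (fun line => line.2.2.1),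
       acc.2.2.1 ++ data.flatMap (fun line => line.2.1),
       acc.2.2.2 ++ data.map (fun line => line.2.2.2)) := by
  induction data generalizing acc with
  | nil => simp
  | cons hd tl ih => simp [List.foldl, ih]

theorem pvUnzip4_eq (data : List (String × List String × List Int × String)) :
    pvUnzip4 data
    = (data.map (fun line => line.1),
       data.map (fun line => line.2.1),
       data.map (fun line => line.2.2.1),
       data.map (fun line => line.2.2.2)) := by
  induction data with
  | nil => simp [pvUnzip4]
  | cons hd tl ih => simp [pvUnzip4, ih]

-- ===== VERDICT =====
theorem mr_collate_spec : Claim_equal_mr_collate := by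
  intro data _
  unfold Spec_mr_collate mr_collate mr_collate_alt
  cases data with
  | nil => simp
  | cons hd tl => simp [mr_collate_fold, pvUnzip4_eq, List.flatMap_map]
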